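-- pv_equiv track=rewrite | github.com/taomujian/jie | Crypto/baigeiRSA2/flag.py | calculate_products
-- ===== SOURCE A (Python) =====
-- from itertools import combinations
-- from functools import reduce
--
-- def calculate_products(numbers):
--     result = []
--     n = len(numbers)
--     for r in range(1, n + 1):
--         combinations_r = combinations(numbers, r)
--         for comb in combinations_r:
--             remaining_nums = [num for num in numbers if num not in comb]
--             if remaining_nums:
--                 product1 = reduce(lambda x, y: x*y, comb)
--                 product2 = reduce(lambda x, y: x*y, remaining_nums)
--                 result.append((product1, product2))
--     return result
-- ===== SOURCE B (Python) =====
-- from itertools import combinations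
--
-- def calculate_products(numbers):
--     # Each distinct value contributes all its occurrences to the complement at once,
--     # so precompute per-value group products; the complement product is then the
--     # product of the groups whose value was not picked (O(1) set lookups, no
--     # per-subset rescan of the whole list).
--     groups = [(v, v ** numbers.count(v)) for v in dict.fromkeys(numbers)]
--     result = []
--     for r in range(1, len(numbers) + 1):
--         for comb in combinations(numbers, r):
--             chosen = set(comb)
--             product2 = 1
--             any_left = False
--             for v, g in groups:
--                 if v not in chosen:
--                     any_left = True
--                     product2 *= g
--             if any_left:
--                 product1 = 1
--                 for x in comb:
--                     product1 *= x
--                 result.append((product1, product2))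
--     return result
-- ===== Notes on version B (the rewrite author's own statement) =====
-- stated objective: alternative
-- what changed: A rebuilds the complement list with an O(n*r) 'num not in comb' scan and reduces it for every subset; B precomputes one product per distinct value (all occurrences of a value leave the complement together), then gets each subset's complement product by multiplying the group products of values not in an O(1)-lookup set of the subset.
import Mathlib
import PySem

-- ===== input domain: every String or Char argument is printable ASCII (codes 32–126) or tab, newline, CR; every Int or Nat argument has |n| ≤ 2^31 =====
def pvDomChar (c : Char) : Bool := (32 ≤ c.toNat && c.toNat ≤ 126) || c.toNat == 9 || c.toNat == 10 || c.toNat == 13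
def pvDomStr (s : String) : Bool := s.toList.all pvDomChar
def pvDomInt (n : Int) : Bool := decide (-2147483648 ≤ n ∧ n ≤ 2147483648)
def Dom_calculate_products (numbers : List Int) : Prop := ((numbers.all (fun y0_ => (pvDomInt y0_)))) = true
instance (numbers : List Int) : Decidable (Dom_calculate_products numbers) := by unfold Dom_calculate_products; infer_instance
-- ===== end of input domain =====

-- B precomputes one product per distinct value (each value's occurrences always leave or
-- stay in the complement together), so the per-subset rescan of the whole list disappears (objective: alternative).

-- ===== PORT A =====
-- functools.reduce(lambda x, y: x*y, l); reduce raises on [], A only calls it on nonempty lists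
def pvReduceMul : List Int → Int
  | [] => 0
  | x :: xs => xs.foldl (· * ·) x

def calculate_products (numbers : List Int) : List (List Int) :=
  let n : Int := numbers.length
  (PySem.List.pyRange 1 (n + 1) 1).foldl (fun result r =>
    (PySem.List.combinations numbers r.toNat).foldl (fun result comb =>
      let remaining := numbers.filter (fun num => !comb.contains num)
      if !remaining.isEmpty then
        result ++ [[pvReduceMul comb, pvReduceMul remaining]]
      else result) result) []

-- ===== PORT B =====
def calculate_products_alt (numbers : List Int) : List (List Int) :=
  -- groups = [(v, v ** numbers.count(v)) for v in dict.fromkeys(numbers)]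
  let groups : List (Int × Int) :=
    (PySem.List.dedup numbers).map (fun v => (v, v ^ numbers.count v))
  (PySem.List.pyRange 1 ((numbers.length : Int) + 1) 1).foldl (fun result r =>
    (PySem.List.combinations numbers r.toNat).foldl (fun result comb =>
      let chosen := PySem.Set.ofList comb
      let pa := groups.foldl (fun (pa : Int × Bool) vg =>
        if PySem.Set.contains chosen vg.1 then pa else (pa.1 * vg.2, true)) (1, false)
      if pa.2 then
        result ++ [[comb.foldl (fun p x => p * x) 1, pa.1]]
      else result) result) []

-- ===== PRECONDITION & SPEC =====
def Spec_calculate_products (numbers : List Int) (out : List (List Int)) : Prop := out = calculate_products_alt numbers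
instance (numbers : List Int) (out : List (List Int)) : Decidable (Spec_calculate_products numbers out) := by unfold Spec_calculate_products; infer_instance

-- ===== CLAIM (what is proved, stated in full; the proofs are below) =====
def Claim_equal_calculate_products : Prop := ∀ (numbers : List Int), Dom_calculate_products numbers → Spec_calculate_products numbers (calculate_products numbers)

-- ===== LEMMAS AND PROOFS =====

theorem pvFoldlMul (l : List Int) (a : Int) : l.foldl (· * ·) a = a * l.prod := by
  induction l generalizing a with
  | nil => simp
  | cons x xs ih => simp [List.foldl_cons, ih (a * x), mul_assoc]

theorem pvReduceMul_eq (l : List Int) (h : l ≠ []) : pvReduceMul l = l.prod := by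
  cases l with
  | nil => simp at h
  | cons x xs => simp [pvReduceMul, pvFoldlMul]

-- B's (product, flag) loop over the group list
theorem pvFoldFlag (q : Int × Int → Bool) (gs : List (Int × Int)) (p : Int) (f : Bool) :
    gs.foldl (fun (pa : Int × Bool) vg => if q vg then pa else (pa.1 * vg.2, true)) (p, f)
      = (p * ((gs.filter (fun vg => !q vg)).map (·.2)).prod,
         f || !(gs.filter (fun vg => !q vg)).isEmpty) := by
  induction gs generalizing p f with
  | nil => simp
  | cons vg gs ih =>
    by_cases hq : q vg
    · simp [hq, ih]
    · simp [hq, ih, mul_assoc]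

-- pulling one factor x out of a product over a nodup list containing x
theorem pvProdPull (es : List Int) (x : Int) (f f' : Int → Int)
    (hn : es.Nodup) (hx : x ∈ es) (hfx : f' x = x * f x)
    (hfo : ∀ v, v ≠ x → f' v = f v) :
    (es.map f').prod = x * (es.map f).prod := by
  induction es with
  | nil => simp at hx
  | cons e es ih =>
    rcases List.nodup_cons.mp hn with ⟨hne, hnes⟩
    rcases List.mem_cons.mp hx with rfl | hxes
    · have : es.map f' = es.map f := by
        apply List.map_congr_left
        intro v hv
        exact hfo v (fun h => hne (h ▸ hv))
      simp [this, hfx, mul_assoc]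
    · have he : f' e = f e := hfo e (fun h => hne (h ▸ hxes))
      simp [he, ih hnes hxes, mul_left_comm]

-- product of per-value group powers over the kept distinct values = product of the kept elements
theorem pvGroupProd (ds : List Int) (hn : ds.Nodup) (keep : Int → Bool) :
    ∀ (l : List Int), (∀ x ∈ l, x ∈ ds) →
      ((ds.filter keep).map (fun v => v ^ l.count v)).prod = (l.filter keep).prod := by
  intro l
  induction l with
  | nil =>
    intro _
    simp
  | cons x t ih =>
    intro hsub
    have hsub' : ∀ y ∈ t, y ∈ ds := fun y hy => hsub y (List.mem_cons_of_mem x hy)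
    have hcount : ∀ v : Int, (x :: t).count v = t.count v + (if v = x then 1 else 0) := by
      intro v
      by_cases hv : v = x
      · subst hv; simp
      · simp [hv, Ne.symm]
    by_cases hk : keep x
    · have hxds : x ∈ ds.filter keep := List.mem_filter.mpr ⟨hsub x (List.mem_cons_self), hk⟩
      have := pvProdPull (ds.filter keep) x
          (fun v => v ^ t.count v) (fun v => v ^ (x :: t).count v)
          (hn.filter keep) hxds
          (by simp [hcount x, pow_succ, mul_comm])
          (by intro v hv; simp [hcount v, hv])
      rw [this, ih hsub']
      simp [hk]
    · have : (ds.filter keep).map (fun v => v ^ (x :: t).count v)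
            = (ds.filter keep).map (fun v => v ^ t.count v) := by
        apply List.map_congr_left
        intro v hv
        have hvk : keep v := (List.mem_filter.mp hv).2
        have hvx : v ≠ x := fun h => by rw [h] at hvk; exact absurd hvk (by simp [hk])
        simp [hcount v, hvx]
      rw [this, ih hsub']
      simp [hk]

-- ===== VERDICT (by name: the statement is the Claim_ definition above) =====
theorem calculate_products_spec : Claim_equal_calculate_products := by
  intro numbers _
  unfold Spec_calculate_products calculate_products calculate_products_alt
  simp only []
  apply PySem.List.foldl_congr_mem
  intro acc r hr
  rw [PySem.List.mem_pyRange_one] at hr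
  apply PySem.List.foldl_congr_mem
  intro acc2 comb hcomb
  have hsub := PySem.List.sublist_of_mem_combinations hcomb
  have hlen := PySem.List.length_of_mem_combinations hcomb
  have hne : comb ≠ [] := by
    intro h
    rw [h] at hlen
    simp at hlen
    omega
  set keep : Int → Bool := fun num => !comb.contains num with hkeep
  have hchosen : ∀ v : Int, PySem.Set.contains (PySem.Set.ofList comb) v = comb.contains v := by
    intro v
    rw [Bool.eq_iff_iff]
    simp [PySem.Set.mem_ofList]
  have hq : (fun vg : Int × Int => !(PySem.Set.contains (PySem.Set.ofList comb) vg.1)) =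
      (fun vg : Int × Int => keep vg.1) := by
    funext vg
    rw [hchosen vg.1, hkeep]
  rw [pvFoldFlag]
  rw [show ((PySem.List.dedup numbers).map (fun v => (v, v ^ numbers.count v))).filter
        (fun vg => !(PySem.Set.contains (PySem.Set.ofList comb) vg.1))
      = (((PySem.List.dedup numbers).filter keep).map (fun v => (v, v ^ numbers.count v))) from by
    rw [List.filter_map]
    congr 1
    apply List.filter_congr
    intro v _
    simp only [Function.comp]
    rw [hchosen v]]
  have hmemiff : ∀ v : Int, v ∈ PySem.List.dedup numbers ↔ v ∈ numbers := by
    exact fun v => PySem.List.mem_dedup numbers v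
  have hempty : (((PySem.List.dedup numbers).filter keep).map
        (fun v => (v, v ^ numbers.count v))).isEmpty = (numbers.filter keep).isEmpty := by
    rw [Bool.eq_iff_iff]
    simp only [List.isEmpty_iff, List.map_eq_nil_iff, List.filter_eq_nil_iff]
    constructor
    · intro h x hx hkx
      exact h x ((hmemiff x).mpr hx) hkx
    · intro h x hx hkx
      exact h x ((hmemiff x).mp hx) hkx
  simp only [List.map_map]
  rw [show ((PySem.List.dedup numbers).filter keep).map
        ((fun vg : Int × Int => vg.2) ∘ fun v => (v, v ^ numbers.count v))
      = ((PySem.List.dedup numbers).filter keep).map (fun v => v ^ numbers.count v) from rfl]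
  rw [pvGroupProd (PySem.List.dedup numbers) (PySem.List.nodup_dedup numbers) keep numbers
        (fun x hx => (hmemiff x).mpr hx)]
  rw [show (((PySem.List.dedup numbers).filter keep).map
        (fun v => (v, v ^ numbers.count v))).isEmpty = (numbers.filter keep).isEmpty from hempty]
  by_cases hrem : (numbers.filter keep).isEmpty
  · simp [hrem]
  · have hremne : numbers.filter keep ≠ [] := by simpa [List.isEmpty_iff] using hrem
    simp only [hrem, Bool.not_false, Bool.false_or, if_true]
    rw [pvReduceMul_eq comb hne, pvReduceMul_eq _ hremne]
    rw [show comb.foldl (fun p x => p * x) 1 = comb.foldl (· * ·) 1 from rfl, pvFoldlMul]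
    simp
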